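-- pv_equiv track=rewrite | github.com/Aravos/SAES-Simplified-AES | sAES_Source Code.py | GF
-- ===== SOURCE A (Python) =====
-- def GF(a, b):
--     product = 0
--     a = a & 0b1111
--     b = b & 0b1111
--     while a and b:
--         if b & 1:
--             product ^= a
--         a<<=1
--         # If a is not in GF(2^4)
--         # it is XOR with an irreducible polynomial
--         # Irreducable Polynomial is x^4+x^2+1
--         if a & (1 << 4):
--             a ^= 0b10011
--         b >>= 1
--     return product
-- ===== SOURCE B (Python) =====
-- def GF(a, b):
--     a &= 0b1111
--     b &= 0b1111
--     if a == 0 or b == 0: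
--         return 0
--     exp = []
--     x = 1
--     for _ in range(15):
--         exp.append(x)
--         x <<= 1
--         if x & 0b10000:
--             x ^= 0b10011
--     log = {v: i for i, v in enumerate(exp)}
--     return exp[(log[a] + log[b]) % 15]
-- ===== Notes on version B (the rewrite author's own statement) =====
-- stated objective: alternative
-- what changed: Replaces A's per-bit shift-and-reduce multiplication loop with precomputed exp/log tables for GF(2^4) (generator 2, reduction polynomial 0b10011): zero operands return 0, otherwise the product is exp[(log[a]+log[b]) % 15].
import Mathlib
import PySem

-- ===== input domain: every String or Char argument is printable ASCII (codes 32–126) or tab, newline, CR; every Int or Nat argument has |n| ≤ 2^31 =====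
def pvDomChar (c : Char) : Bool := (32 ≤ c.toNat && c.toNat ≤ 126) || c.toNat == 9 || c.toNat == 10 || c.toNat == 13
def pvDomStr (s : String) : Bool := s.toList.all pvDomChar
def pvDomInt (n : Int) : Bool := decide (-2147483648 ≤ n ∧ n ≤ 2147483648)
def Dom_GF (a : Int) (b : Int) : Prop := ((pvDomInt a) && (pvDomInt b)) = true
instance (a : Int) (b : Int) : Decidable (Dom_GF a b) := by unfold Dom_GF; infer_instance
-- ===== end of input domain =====

-- B replaces A's per-bit shift-and-reduce multiply loop by exp/log tables for GF(2^4)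
-- (generator 2, reduction polynomial 0b10011) and one modular index addition (objective: alternative).

-- ===== PORT A =====
-- A's while loop: after masking, b ∈ [0, 16), and b is halved each iteration, so the
-- loop runs at most 4 times; fuel 4 makes the same loop total without changing it.
def gfLoopA : Nat → Int → Int → Int → Int
  | 0, _, _, product => product
  | fuel+1, a, b, product =>
    if a ≠ 0 ∧ b ≠ 0 then
      let product := if PySem.Int.band b 1 ≠ 0 then PySem.Int.bxor product a else product
      let a := a <<< 1
      let a := if PySem.Int.band a 16 ≠ 0 then PySem.Int.bxor a 19 else a
      gfLoopA fuel a (b >>> 1) product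
    else product

def GF (a : Int) (b : Int) : Int :=
  let a := PySem.Int.band a 15
  let b := PySem.Int.band b 15
  gfLoopA 4 a b 0

-- ===== PORT B =====
-- Source B's table-building loop: 15 steps, each records x then multiplies it by the generator 2.
def gfExpBuild : Nat → Int → List Int
  | 0, _ => []
  | n+1, x =>
    x :: (let x' := x <<< 1
          gfExpBuild n (if PySem.Int.band x' 16 ≠ 0 then PySem.Int.bxor x' 19 else x'))

def gfExp : List Int := gfExpBuild 15 1

def GF_alt (a : Int) (b : Int) : Int :=
  let a := PySem.Int.band a 15
  let b := PySem.Int.band b 15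
  if a = 0 ∨ b = 0 then 0
  else
    -- Source B's 'log' dict maps each table value to its index; looked up here by first index.
    let i := (PySem.List.index? gfExp a).getD 0
    let j := (PySem.List.index? gfExp b).getD 0
    gfExp.getD ((i + j) % 15) 0

-- ===== PRECONDITION & SPEC =====
def Spec_GF (a : Int) (b : Int) (out : Int) : Prop := out = GF_alt a b
instance (a : Int) (b : Int) (out : Int) : Decidable (Spec_GF a b out) := by unfold Spec_GF; infer_instance

-- ===== CLAIM (what is proved, stated in full; the proofs are below) =====
def Claim_equal_GF : Prop := ∀ (a : Int) (b : Int), Dom_GF a b → Spec_GF a b (GF a b)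

-- ===== LEMMAS AND PROOFS =====

-- Python's  n & 15  is  n mod 16, also for negative n.
theorem band_fifteen (a : Int) : PySem.Int.band a 15 = a % 16 := by
  unfold PySem.Int.band
  rcases le_or_gt 0 a with ha | ha
  · rw [if_pos ha, if_pos (by norm_num : (0:Int) ≤ 15)]
    have h := Nat.and_two_pow_sub_one_eq_mod a.toNat 4
    simp only [show (2^4 : Nat) = 16 from rfl] at h
    rw [show ((15 : Int).toNat) = 15 from rfl, h]
    omega
  · rw [if_neg (by omega), if_pos (by norm_num : (0:Int) ≤ 15)]
    have h := Nat.and_two_pow_sub_one_eq_mod (-a - 1).toNat 4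
    simp only [show (2^4 : Nat) = 16 from rfl] at h
    rw [show ((15 : Int).toNat) = 15 from rfl, Nat.land_comm, h]
    omega

theorem mask_lt (a : Int) : 0 ≤ a % 16 ∧ a % 16 < 16 := by
  constructor
  · exact Int.emod_nonneg a (by norm_num)
  · exact Int.emod_lt_of_pos a (by norm_num)

-- the finite core: both ports agree on all 256 masked nibble pairs
theorem core (m n : Nat) (hm : m < 16) (hn : n < 16) : GF (m : Int) (n : Int) = GF_alt (m : Int) (n : Int) := by
  interval_cases m <;> interval_cases n <;> decide

theorem GF_mask (a b : Int) : GF a b = GF (a % 16) (b % 16) := by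
  unfold GF
  rw [band_fifteen, band_fifteen, band_fifteen, band_fifteen,
      Int.emod_emod_of_dvd _ (by norm_num), Int.emod_emod_of_dvd _ (by norm_num)]

theorem GF_alt_mask (a b : Int) : GF_alt a b = GF_alt (a % 16) (b % 16) := by
  unfold GF_alt
  rw [band_fifteen, band_fifteen, band_fifteen, band_fifteen,
      Int.emod_emod_of_dvd _ (by norm_num), Int.emod_emod_of_dvd _ (by norm_num)]

-- ===== VERDICT (by name: the statement is the Claim_ definition above) =====
theorem GF_spec : Claim_equal_GF := by
  intro a b _
  unfold Spec_GF
  rw [GF_mask, GF_alt_mask]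
  have ha := mask_lt a
  have hb := mask_lt b
  have := core (a % 16).toNat (b % 16).toNat (by omega) (by omega)
  rwa [Int.toNat_of_nonneg ha.1, Int.toNat_of_nonneg hb.1] at this
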